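-- pv_equiv track=rewrite | github.com/pedromsilvapt/miei-dissertation | code/SoundPlaygroundPy/parser/abstract_syntax_tree/macros/keyboard.py | handle_modifiers
-- ===== SOURCE A (Python) =====
-- from typing import List
--
-- ModifierNames = [ 'hold', 'extend', 'toggle', 'repeat' ]
--
-- def handle_modifiers ( modifiers : List[str] ) -> (dict, str):
--     props = dict()
--
--     rest = None
--
--     for i in range( len( modifiers ) - 1, -1, -1 ):
--         if modifiers[ i ] in ModifierNames:
--             props[ modifiers[ i ] ] = True
--         else:
--             rest = '+'.join( modifiers[ 0:i + 1 ] )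
--             break
--
--     return (props, rest)
-- ===== SOURCE B (Python) =====
-- ModifierNames = [ 'hold', 'extend', 'toggle', 'repeat' ]
--
-- def handle_modifiers(modifiers):
--     # One forward pass over enumerate: cut ends up just past the LAST
--     # non-modifier element, so modifiers[cut:] is the trailing modifier run.
--     cut = 0
--     for j, m in enumerate(modifiers):
--         if m not in ModifierNames:
--             cut = j + 1
--     props = dict.fromkeys(reversed(modifiers[cut:]), True)
--     rest = '+'.join(modifiers[:cut]) if cut > 0 else None
--     return props, rest
-- ===== Notes on version B (the rewrite author's own statement) =====
-- stated objective: alternative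
-- what changed: A walks indices backward from the end with a break, building the dict incrementally and joining inside the loop; B makes one forward pass over enumerate tracking only the cut just past the last non-modifier, then builds props (dict.fromkeys) and rest (join) from the two slices at the cut.
import Mathlib
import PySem

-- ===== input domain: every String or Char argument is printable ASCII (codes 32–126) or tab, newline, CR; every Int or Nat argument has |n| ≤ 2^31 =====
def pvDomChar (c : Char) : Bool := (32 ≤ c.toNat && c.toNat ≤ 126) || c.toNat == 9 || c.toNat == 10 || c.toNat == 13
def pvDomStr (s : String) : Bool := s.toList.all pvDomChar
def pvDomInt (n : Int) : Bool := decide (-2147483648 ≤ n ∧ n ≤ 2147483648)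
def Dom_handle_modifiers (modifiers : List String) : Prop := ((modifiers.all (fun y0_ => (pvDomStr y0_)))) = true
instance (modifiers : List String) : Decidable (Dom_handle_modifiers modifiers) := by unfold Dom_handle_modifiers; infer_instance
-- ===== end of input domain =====

-- B replaces A's backward index loop by one forward pass over enumerate computing the cut past the
-- last non-modifier, then builds both outputs from the two slices at the cut (objective: alternative).

-- ===== PORT A =====
def ModifierNames : List String := ["hold", "extend", "toggle", "repeat"]

-- the reversed for-loop of A, with break; indices come from range(len-1, -1, -1) so pyGetD's default is never used
def aLoop (modifiers : List String) : List Int → PySem.Dict String Bool → PySem.Dict String Bool × Option String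
  | [], props => (props, none)
  | i :: is, props =>
      let m := PySem.List.pyGetD modifiers i ""
      if ModifierNames.contains m then
        aLoop modifiers is (props.insert m true)
      else
        (props, some (PySem.Str.join "+" (PySem.List.slice modifiers (some 0) (some (i + 1)))))

def handle_modifiers (modifiers : List String) : (List (String × Bool)) × Option String :=
  let r := aLoop modifiers (PySem.List.pyRange ((modifiers.length : Int) - 1) (-1) (-1)) PySem.Dict.empty
  (r.1.items, r.2)

-- ===== PORT B =====
-- for j, m in enumerate(modifiers): if m not in ModifierNames: cut = j + 1
def bCut (modifiers : List String) : Int :=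
  (PySem.List.enumerate modifiers 0).foldl
    (fun cut jm => if ModifierNames.contains jm.2 then cut else jm.1 + 1) 0

def handle_modifiers_alt (modifiers : List String) : (List (String × Bool)) × Option String :=
  let cut := bCut modifiers
  -- dict.fromkeys(reversed(modifiers[cut:]), True)
  let props := (PySem.List.slice modifiers (some cut) none).reverse.foldl
      (fun (d : PySem.Dict String Bool) m => d.insert m true) PySem.Dict.empty
  let rest := if cut > 0 then some (PySem.Str.join "+" (PySem.List.slice modifiers none (some cut))) else none
  (props.items, rest)

-- ===== PRECONDITION & SPEC =====
def Spec_handle_modifiers (modifiers : List String) (out : (List (String × Bool)) × Option String) : Prop := out = handle_modifiers_alt modifiers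
instance (modifiers : List String) (out : (List (String × Bool)) × Option String) : Decidable (Spec_handle_modifiers modifiers out) := by unfold Spec_handle_modifiers; infer_instance

-- ===== CLAIM (what is proved, stated in full; the proofs are below) =====
def Claim_equal_handle_modifiers : Prop := ∀ (modifiers : List String), Dom_handle_modifiers modifiers → Spec_handle_modifiers modifiers (handle_modifiers modifiers)

-- ===== LEMMAS AND PROOFS =====

-- proof-side boundary function: index of the start of the trailing modifier run within the first i elements
def bBoundary (modifiers : List String) : Nat → Nat
  | 0 => 0
  | i + 1 => if ModifierNames.contains (modifiers.getD i "") then bBoundary modifiers i else i + 1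

theorem bBoundary_le (modifiers : List String) (i : Nat) : bBoundary modifiers i ≤ i := by
  induction i with
  | zero => simp [bBoundary]
  | succ i ih => simp only [bBoundary]; split <;> omega

theorem bBoundary_append (l : List String) (x : String) (i : Nat) (hi : i ≤ l.length) :
    bBoundary (l ++ [x]) i = bBoundary l i := by
  induction i with
  | zero => simp [bBoundary]
  | succ i ih =>
      have hlt : i < l.length := hi
      have hget : (l ++ [x]).getD i "" = l.getD i "" := by
        rw [List.getD_eq_getElem?_getD, List.getD_eq_getElem?_getD, List.getElem?_append_left hlt]
      simp only [bBoundary, hget, ih (Nat.le_of_succ_le hi)]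

theorem bCut_eq (l : List String) : bCut l = (bBoundary l l.length : Int) := by
  induction l using List.reverseRecOn with
  | nil => simp [bCut, bBoundary, PySem.List.enumerate]
  | append_singleton l x ih =>
      have henum : PySem.List.enumerate (l ++ [x]) 0 =
          PySem.List.enumerate l 0 ++ [((l.length : Int), x)] := by
        rw [PySem.List.enumerate_append]
        simp [PySem.List.enumerate_cons, PySem.List.enumerate_nil]
      have hgetx : (l ++ [x]).getD l.length "" = x := by
        rw [List.getD_eq_getElem?_getD, List.getElem?_concat_length]
        rfl
      have hb : bBoundary (l ++ [x]) (l.length + 1) =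
          if ModifierNames.contains x then bBoundary l l.length else l.length + 1 := by
        rw [show bBoundary (l ++ [x]) (l.length + 1) =
            if ModifierNames.contains ((l ++ [x]).getD l.length "") then bBoundary (l ++ [x]) l.length
            else l.length + 1 from rfl, hgetx, bBoundary_append l x l.length (le_refl _)]
      have hc : bCut (l ++ [x]) =
          if ModifierNames.contains x then bCut l else (l.length : Int) + 1 := by
        unfold bCut
        rw [henum, List.foldl_append]
        simp only [List.foldl_cons, List.foldl_nil]
      rw [hc]
      simp only [List.length_append, List.length_singleton]
      rw [hb]
      by_cases hm : ModifierNames.contains x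
      · rw [if_pos hm, if_pos hm]
        exact ih
      · rw [if_neg hm, if_neg hm]
        push_cast
        ring

-- main invariant: A's loop over the first i indices (descending) equals the boundary-based answer
theorem aLoop_eq (modifiers : List String) (i : Nat) (hi : i ≤ modifiers.length)
    (p : PySem.Dict String Bool) :
    aLoop modifiers ((PySem.List.pyRange 0 (i : Int) 1).reverse) p =
      (((modifiers.drop (bBoundary modifiers i)).take (i - bBoundary modifiers i)).reverse.foldl
          (fun (d : PySem.Dict String Bool) m => d.insert m true) p,
        if bBoundary modifiers i > 0 then
          some (PySem.Str.join "+" (modifiers.take (bBoundary modifiers i))) else none) := by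
  induction i generalizing p with
  | zero =>
      simp [PySem.List.pyRange_one_eq_nil, aLoop, bBoundary]
  | succ i ih =>
      have hi' : i ≤ modifiers.length := Nat.le_of_succ_le hi
      have hlt : i < modifiers.length := hi
      have hrange : PySem.List.pyRange 0 ((i : Int) + 1) 1 =
          PySem.List.pyRange 0 (i : Int) 1 ++ [(i : Int)] :=
        PySem.List.pyRange_one_succ_right (by positivity)
      have hget : PySem.List.pyGetD modifiers ((i : Nat) : Int) "" = modifiers[i] := by
        rw [PySem.List.pyGetD_natCast]; exact List.getD_eq_getElem _ _ hlt
      have hpush : ((i : Nat) : Int) + 1 = (((i + 1 : Nat)) : Int) := by push_cast; ring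
      simp only [Nat.cast_succ, hrange, List.reverse_append, List.reverse_cons,
        List.reverse_nil, List.nil_append, List.singleton_append, aLoop, hget]
      by_cases hc : ModifierNames.contains modifiers[i]
      · -- modifier: loop continues; boundary moves past i
        have hb : bBoundary modifiers (i + 1) = bBoundary modifiers i := by
          simp only [bBoundary, List.getD_eq_getElem modifiers "" hlt, hc, if_true]
        have hble : bBoundary modifiers i ≤ i := bBoundary_le modifiers i
        rw [if_pos hc, ih hi']
        rw [hb]
        congr 1
        -- props component: take one more element
        have hsz : i + 1 - bBoundary modifiers i = (i - bBoundary modifiers i) + 1 := by omega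
        have hidx : (modifiers.drop (bBoundary modifiers i))[i - bBoundary modifiers i]? =
            some modifiers[i] := by
          rw [List.getElem?_drop]
          have heq : bBoundary modifiers i + (i - bBoundary modifiers i) = i := by omega
          rw [heq]
          exact List.getElem?_eq_getElem hlt
        rw [hsz, List.take_add_one, hidx]
        simp
      · -- non-modifier: break; boundary is i+1
        have hb : bBoundary modifiers (i + 1) = i + 1 := by
          have hgd : modifiers.getD i "" = modifiers[i] := List.getD_eq_getElem _ _ hlt
          simp only [bBoundary, hgd]
          rw [if_neg hc]
        rw [if_neg hc, hb]
        have hslice : PySem.List.slice modifiers (some 0) (some ((i : Int) + 1)) =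
            modifiers.take (i + 1) := by
          rw [hpush]
          rw [PySem.List.slice_zero_start, PySem.List.slice_to_natCast]
        simp [hslice]

-- ===== VERDICT (by name: the statement is the Claim_ definition above) =====
theorem handle_modifiers_spec : Claim_equal_handle_modifiers := by
  unfold Claim_equal_handle_modifiers Spec_handle_modifiers
  intro modifiers _
  unfold handle_modifiers handle_modifiers_alt
  have hrev : PySem.List.pyRange ((modifiers.length : Int) - 1) (-1) (-1) =
      (PySem.List.pyRange 0 (modifiers.length : Int) 1).reverse := by
    have := PySem.List.pyRange_neg_one_eq_reverse ((modifiers.length : Int) - 1) (-1)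
    simpa using this
  have hle := bBoundary_le modifiers modifiers.length
  have htake : (modifiers.drop (bBoundary modifiers modifiers.length)).take
      (modifiers.length - bBoundary modifiers modifiers.length) =
      modifiers.drop (bBoundary modifiers modifiers.length) := by
    apply List.take_of_length_le
    simp
  simp only [hrev, bCut_eq, PySem.List.slice_from_natCast, PySem.List.slice_to_natCast,
    gt_iff_lt, Int.natCast_pos]
  rw [aLoop_eq modifiers modifiers.length (le_refl _), htake]
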